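-- pv_equiv track=rewrite | github.com/V3ndet4/ufc-bot | models/accuracy.py | _postmortem_next_action
-- ===== SOURCE A (Python) =====
-- def _postmortem_next_action(codes: list[str]) -> str:
--     if "bad_price_loss" in codes or "right_side_bad_price" in codes:
--         return "tighten_entry_price"
--     if any(code in codes for code in ["data_quality_miss"]):
--         return "tighten_data_or_lower_confidence"
--     if any(code in codes for code in ["thin_sample_loss"]):
--         return "raise_sample_gate"
--     if any(code in codes for code in ["context_risk_hit"]):
--         return "tighten_context_gate"
--     if any(code in codes for code in ["prop_market_loss"]):
--         return "review_prop_market_gate"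
--     if any(code in codes for code in ["market_disagreement_miss"]):
--         return "increase_market_respect"
--     if any(code in codes for code in ["overconfident_loss"]):
--         return "calibrate_probability_bucket"
--     return "keep" if "validated_read" in codes else "review"
-- ===== SOURCE B (Python) =====
-- _RULEBOOK = {
--     "bad_price_loss": (0, "tighten_entry_price"),
--     "right_side_bad_price": (0, "tighten_entry_price"),
--     "data_quality_miss": (1, "tighten_data_or_lower_confidence"),
--     "thin_sample_loss": (2, "raise_sample_gate"),
--     "context_risk_hit": (3, "tighten_context_gate"),
--     "prop_market_loss": (4, "review_prop_market_gate"),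
--     "market_disagreement_miss": (5, "increase_market_respect"),
--     "overconfident_loss": (6, "calibrate_probability_bucket"),
-- }
--
--
-- def _postmortem_next_action(codes: list[str]) -> str:
--     best = None  # (priority, action) with the smallest priority seen so far
--     validated = False
--     for c in codes:
--         if c == "validated_read":
--             validated = True
--         hit = _RULEBOOK.get(c)
--         if hit is not None and (best is None or hit[0] < best[0]):
--             best = hit
--     if best is not None:
--         return best[1]
--     return "keep" if validated else "review"
-- ===== Notes on version B (the rewrite author's own statement) =====
-- stated objective: alternative
-- what changed: Inverts the traversal: instead of an if-chain testing each rule's trigger codes against the list (repeated 'in codes' membership scans), B makes a single pass over codes, looking each code up in a priority/action dict and keeping the minimum-priority hit, with a validated_read flag for the default.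
import Mathlib
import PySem

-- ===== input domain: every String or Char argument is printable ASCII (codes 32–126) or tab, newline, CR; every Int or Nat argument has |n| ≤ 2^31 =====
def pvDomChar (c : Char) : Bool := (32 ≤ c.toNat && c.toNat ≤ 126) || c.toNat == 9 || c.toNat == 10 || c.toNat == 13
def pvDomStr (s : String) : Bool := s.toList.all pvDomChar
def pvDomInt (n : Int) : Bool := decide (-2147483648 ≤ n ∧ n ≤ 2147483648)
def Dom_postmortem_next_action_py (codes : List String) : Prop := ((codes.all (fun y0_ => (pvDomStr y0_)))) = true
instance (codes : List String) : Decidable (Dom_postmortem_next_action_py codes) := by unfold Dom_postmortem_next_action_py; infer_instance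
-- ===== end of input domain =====

-- B replaces A's if-chain of membership scans by a single pass over codes keeping the
-- minimum-priority hit from a rulebook dict (objective: alternative traversal).


-- ===== PORT A =====
def postmortem_next_action_py (codes : List String) : String :=
  if codes.contains "bad_price_loss" || codes.contains "right_side_bad_price" then
    "tighten_entry_price"
  else if (["data_quality_miss"] : List String).any (fun code => codes.contains code) then
    "tighten_data_or_lower_confidence"
  else if (["thin_sample_loss"] : List String).any (fun code => codes.contains code) then
    "raise_sample_gate"
  else if (["context_risk_hit"] : List String).any (fun code => codes.contains code) then
    "tighten_context_gate"
  else if (["prop_market_loss"] : List String).any (fun code => codes.contains code) then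
    "review_prop_market_gate"
  else if (["market_disagreement_miss"] : List String).any (fun code => codes.contains code) then
    "increase_market_respect"
  else if (["overconfident_loss"] : List String).any (fun code => codes.contains code) then
    "calibrate_probability_bucket"
  else if codes.contains "validated_read" then "keep" else "review"

-- ===== PORT B =====
-- the module-level _RULEBOOK dict (code -> (priority, action))
def pmRulebook : PySem.Dict String (Nat × String) :=
  PySem.Dict.ofList
    [ ("bad_price_loss", (0, "tighten_entry_price")),
      ("right_side_bad_price", (0, "tighten_entry_price")),
      ("data_quality_miss", (1, "tighten_data_or_lower_confidence")),
      ("thin_sample_loss", (2, "raise_sample_gate")),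
      ("context_risk_hit", (3, "tighten_context_gate")),
      ("prop_market_loss", (4, "review_prop_market_gate")),
      ("market_disagreement_miss", (5, "increase_market_respect")),
      ("overconfident_loss", (6, "calibrate_probability_bucket")) ]

-- the loop body: update (best, validated) with one code
def pmStep (s : Option (Nat × String) × Bool) (c : String) : Option (Nat × String) × Bool :=
  let v := if c == "validated_read" then true else s.2
  match PySem.Dict.get? pmRulebook c with
  | none => (s.1, v)
  | some hit =>
    match s.1 with
    | none => (some hit, v)
    | some best => (if hit.1 < best.1 then some hit else some best, v)

def postmortem_next_action_py_alt (codes : List String) : String :=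
  let s := codes.foldl pmStep (none, false)
  match s.1 with
  | some best => best.2
  | none => if s.2 then "keep" else "review"

-- ===== PRECONDITION & SPEC =====
def Spec_postmortem_next_action_py (codes : List String) (out : String) : Prop := out = postmortem_next_action_py_alt codes
instance (codes : List String) (out : String) : Decidable (Spec_postmortem_next_action_py codes out) := by unfold Spec_postmortem_next_action_py; infer_instance

-- ===== CLAIM (what is proved, stated in full; the proofs are below) =====
def Claim_equal_postmortem_next_action_py : Prop := ∀ (codes : List String), Dom_postmortem_next_action_py codes → Spec_postmortem_next_action_py codes (postmortem_next_action_py codes)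

-- ===== LEMMAS AND PROOFS =====

-- left-biased min on optional (priority, action) hits, as B's loop keeps it
def pmMin (a b : Option (Nat × String)) : Option (Nat × String) :=
  match a, b with
  | none, b => b
  | a, none => a
  | some x, some y => if y.1 < x.1 then some y else some x

-- the fold's best component, recursively over codes
def pmBest (codes : List String) : Option (Nat × String) :=
  match codes with
  | [] => none
  | c :: cs => pmMin (PySem.Dict.get? pmRulebook c) (pmBest cs)

lemma pmMin_assoc (a b c : Option (Nat × String)) :
    pmMin (pmMin a b) c = pmMin a (pmMin b c) := by
  rcases a with _ | x <;> rcases b with _ | y <;> rcases c with _ | z <;>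
    simp only [pmMin] <;> split_ifs <;> simp only [pmMin] <;>
    split_ifs <;> first | rfl | omega

lemma pmIf_or (b : Bool) (c : String) :
    (if c == "validated_read" then true else b) = (b || (c == "validated_read")) := by
  cases h : (c == "validated_read") <;> simp [h]

lemma pmStep_eq (s : Option (Nat × String) × Bool) (c : String) :
    pmStep s c = (pmMin s.1 (PySem.Dict.get? pmRulebook c),
                  s.2 || (c == "validated_read")) := by
  unfold pmStep pmMin
  rcases h : PySem.Dict.get? pmRulebook c with _ | hit <;>
    rcases s1 : s.1 with _ | best <;> simp only [pmIf_or]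

lemma pmBeq_comm (c : String) : (c == "validated_read") = ("validated_read" == c) := by
  by_cases h : c = "validated_read"
  · subst h; rfl
  · simp [h, Ne.symm h]

lemma foldl_pmStep (codes : List String) (b : Option (Nat × String)) (v : Bool) :
    codes.foldl pmStep (b, v) =
      (pmMin b (pmBest codes), v || codes.contains "validated_read") := by
  induction codes generalizing b v with
  | nil => cases b <;> simp [pmBest, pmMin]
  | cons c cs ih =>
    simp only [List.foldl_cons, pmStep_eq, ih, pmBest, pmMin_assoc,
      List.contains_cons]
    rw [Bool.or_assoc, pmBeq_comm]

lemma pmGet (k : String) : PySem.Dict.get? pmRulebook k =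
    (PySem.Dict.mk
      [ ("bad_price_loss", (0, "tighten_entry_price")),
        ("right_side_bad_price", (0, "tighten_entry_price")),
        ("data_quality_miss", (1, "tighten_data_or_lower_confidence")),
        ("thin_sample_loss", (2, "raise_sample_gate")),
        ("context_risk_hit", (3, "tighten_context_gate")),
        ("prop_market_loss", (4, "review_prop_market_gate")),
        ("market_disagreement_miss", (5, "increase_market_respect")),
        ("overconfident_loss", (6, "calibrate_probability_bucket")) ]).get? k := rfl

lemma pmGet_none (c : String)
    (h1 : c ≠ "bad_price_loss") (h2 : c ≠ "right_side_bad_price")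
    (h3 : c ≠ "data_quality_miss") (h4 : c ≠ "thin_sample_loss")
    (h5 : c ≠ "context_risk_hit") (h6 : c ≠ "prop_market_loss")
    (h7 : c ≠ "market_disagreement_miss") (h8 : c ≠ "overconfident_loss") :
    PySem.Dict.get? pmRulebook c = none := by
  rw [pmGet]
  simp [PySem.Dict.get?_mk_cons, Ne.symm h1, Ne.symm h2, Ne.symm h3, Ne.symm h4,
    Ne.symm h5, Ne.symm h6, Ne.symm h7, Ne.symm h8]
  rfl

-- pmBest characterised as A's priority chain
set_option maxHeartbeats 8000000 in
lemma pmBest_chain (codes : List String) :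
    pmBest codes =
      if codes.contains "bad_price_loss" || codes.contains "right_side_bad_price" then
        some (0, "tighten_entry_price")
      else if codes.contains "data_quality_miss" then some (1, "tighten_data_or_lower_confidence")
      else if codes.contains "thin_sample_loss" then some (2, "raise_sample_gate")
      else if codes.contains "context_risk_hit" then some (3, "tighten_context_gate")
      else if codes.contains "prop_market_loss" then some (4, "review_prop_market_gate")
      else if codes.contains "market_disagreement_miss" then some (5, "increase_market_respect")
      else if codes.contains "overconfident_loss" then some (6, "calibrate_probability_bucket")
      else none := by
  induction codes with
  | nil => simp [pmBest]
  | cons c cs ih =>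
    simp only [pmBest, ih, List.contains_cons]
    by_cases e1 : c = "bad_price_loss"
    · subst e1
      rw [pmGet]
      simp [PySem.Dict.get?_mk_cons]
      split_ifs <;> simp [pmMin]
    by_cases e2 : c = "right_side_bad_price"
    · subst e2
      rw [pmGet]
      simp [PySem.Dict.get?_mk_cons]
      split_ifs <;> simp [pmMin]
    by_cases e3 : c = "data_quality_miss"
    · subst e3
      rw [pmGet]
      simp [PySem.Dict.get?_mk_cons]
      split_ifs <;> simp [pmMin]
    by_cases e4 : c = "thin_sample_loss"
    · subst e4
      rw [pmGet]
      simp [PySem.Dict.get?_mk_cons]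
      split_ifs <;> simp [pmMin]
    by_cases e5 : c = "context_risk_hit"
    · subst e5
      rw [pmGet]
      simp [PySem.Dict.get?_mk_cons]
      split_ifs <;> simp [pmMin]
    by_cases e6 : c = "prop_market_loss"
    · subst e6
      rw [pmGet]
      simp [PySem.Dict.get?_mk_cons]
      split_ifs <;> simp [pmMin]
    by_cases e7 : c = "market_disagreement_miss"
    · subst e7
      rw [pmGet]
      simp [PySem.Dict.get?_mk_cons]
      split_ifs <;> simp [pmMin]
    by_cases e8 : c = "overconfident_loss"
    · subst e8
      rw [pmGet]
      simp [PySem.Dict.get?_mk_cons]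
      split_ifs <;> simp [pmMin]
    · rw [pmGet_none c e1 e2 e3 e4 e5 e6 e7 e8]
      simp [pmMin, e1, e2, e3, e4, e5, e6, e7, e8, Ne.symm e1, Ne.symm e2, Ne.symm e3,
        Ne.symm e4, Ne.symm e5, Ne.symm e6, Ne.symm e7, Ne.symm e8]

-- ===== VERDICT (by name: the statement is the Claim_ definition above) =====
theorem postmortem_next_action_py_spec : Claim_equal_postmortem_next_action_py := by
  intro codes _
  unfold Spec_postmortem_next_action_py postmortem_next_action_py postmortem_next_action_py_alt
  simp only [foldl_pmStep, pmBest_chain, pmMin, Bool.false_or,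
    List.any_cons, List.any_nil, Bool.or_false]
  split_ifs <;> simp_all
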